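-- pv_equiv track=rewrite | github.com/dblyon/mod_sites_and_prob | sites.py | parse_sites_within_pepseq
-- ===== SOURCE A (Python) =====
-- MODTYPE = "(ac)"
--
-- def parse_sites_within_pepseq(aaseq, sites):
--     try:
--         start_index = aaseq.index(MODTYPE)
--         start_index -= 1
--     except ValueError:
--         return sites
--     stop_index = start_index + len(MODTYPE)
--     sites_new = [start_index]
--     sites += sites_new
--     aaseq = aaseq[:start_index + 1] + aaseq[stop_index + 1:]
--     return parse_sites_within_pepseq(aaseq, sites)
-- ===== SOURCE B (Python) =====
-- # Single left-to-right stack scan: push characters; whenever the top of the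
-- # stack spells "(ac)", pop it and record len(stack)-1. Equivalent to A's
-- # repeated leftmost-occurrence removal (including markers created by splicing
-- # two halves together when a marker is deleted). Like A, mutates `sites`
-- # in place via +=.
-- MODTYPE = "(ac)"
--
-- def parse_sites_within_pepseq(aaseq, sites):
--     marker = list(MODTYPE)
--     stack = []
--     found = []
--     for ch in aaseq:
--         stack.append(ch)
--         if stack[-4:] == marker:
--             del stack[-4:]
--             found.append(len(stack) - 1)
--     sites += found
--     return sites
-- ===== Notes on version B (the rewrite author's own statement) =====
-- stated objective: alternative
-- what changed: Replaced A's recursive find-leftmost-then-delete-and-rescan loop by a single left-to-right stack scan that pops '(ac)' off the stack top and records len(stack)-1, which is provably the same as repeated leftmost removal (including markers spliced together by a deletion).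
import Mathlib
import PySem

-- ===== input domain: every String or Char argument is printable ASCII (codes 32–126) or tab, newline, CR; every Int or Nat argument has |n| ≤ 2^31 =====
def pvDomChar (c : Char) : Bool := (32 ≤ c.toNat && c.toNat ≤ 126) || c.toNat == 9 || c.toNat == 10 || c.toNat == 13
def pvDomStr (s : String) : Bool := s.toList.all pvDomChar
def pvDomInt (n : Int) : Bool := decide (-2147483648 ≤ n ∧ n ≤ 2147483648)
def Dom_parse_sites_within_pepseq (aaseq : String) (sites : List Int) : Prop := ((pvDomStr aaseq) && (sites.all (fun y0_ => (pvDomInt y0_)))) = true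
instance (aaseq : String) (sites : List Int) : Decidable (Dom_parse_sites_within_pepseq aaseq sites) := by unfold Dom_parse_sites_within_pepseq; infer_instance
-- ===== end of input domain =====

-- B replaces A's find-leftmost/delete/rescan recursion by one left-to-right stack scan
-- (objective: alternative single-pass algorithm). Both A and B mutate the Python `sites`
-- list in place via `+=`; the equivalence proved here is about the return value.

-- MODTYPE = "(ac)"
def pvPat : List Char := ['(', 'a', 'c', ')']

-- ===== PORT A =====
-- needed by the port's decreasing_by: if "(ac)" is found, it fits inside the list
theorem pvFindFits (l : List Char) (h : ¬ PySem.Chars.find l pvPat = -1) :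
    0 ≤ PySem.Chars.find l pvPat ∧ (PySem.Chars.find l pvPat).toNat + 4 ≤ l.length := by
  have h0 : 0 ≤ PySem.Chars.find l pvPat :=
    (PySem.Chars.find_nonneg_iff l pvPat).mpr ((PySem.Chars.find_ne_neg_one_iff l pvPat).mp h)
  have hsp := (PySem.Chars.find_spec h0).1
  have hl := hsp.length_le
  rw [List.length_drop, show pvPat.length = 4 from rfl] at hl
  exact ⟨h0, by omega⟩

-- helper on code points (the Str primitives are thin wrappers over these)
def parseSitesA (l : List Char) (sites : List Int) : List Int :=
  let i := PySem.Chars.find l pvPat          -- aaseq.index(MODTYPE); -1 = ValueError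
  if h : i = -1 then sites                   -- except ValueError: return sites
  else
    let start_index := i - 1
    let stop_index := start_index + 4        -- start_index + len(MODTYPE)
    let sites_new := [start_index]
    let sites2 := sites ++ sites_new         -- sites += sites_new
    let l2 := PySem.Chars.slice l none (some (start_index + 1)) ++
              PySem.Chars.slice l (some (stop_index + 1)) none
    parseSitesA l2 sites2
termination_by l.length
decreasing_by
  obtain ⟨h0, hlen⟩ := pvFindFits l h
  have e1 : PySem.Chars.find l pvPat - 1 + 1 = PySem.Chars.find l pvPat := by ring
  have e2 : PySem.Chars.find l pvPat - 1 + 4 + 1 = PySem.Chars.find l pvPat + 4 := by ring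
  simp only [e1, e2, PySem.Chars.slice_eq_listSlice]
  rw [PySem.List.slice_to l h0, PySem.List.slice_from l (by omega : (0:Int) ≤ PySem.Chars.find l pvPat + 4)]
  have h4 : (PySem.Chars.find l pvPat + 4).toNat = (PySem.Chars.find l pvPat).toNat + 4 := by omega
  simp only [List.length_append, List.length_take, List.length_drop, h4]
  omega

def parse_sites_within_pepseq (aaseq : String) (sites : List Int) : List Int :=
  parseSitesA aaseq.toList sites

-- ===== PORT B =====
-- stack held in reverse (Python appends/pops at the right end)
def pvScanB : List Char → List Char → List Int → List Int
  | [], _, found => found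
  | c :: cs, rstack, found =>
    let rs := c :: rstack                                   -- stack.append(ch)
    if rs.take 4 = [')', 'c', 'a', '('] then                -- stack[-4:] == marker
      pvScanB cs (rs.drop 4) (found ++ [((rs.drop 4).length : Int) - 1])
    else
      pvScanB cs rs found

def parse_sites_within_pepseq_alt (aaseq : String) (sites : List Int) : List Int :=
  sites ++ pvScanB aaseq.toList [] []                       -- sites += found; return sites

-- ===== PRECONDITION & SPEC =====
def Spec_parse_sites_within_pepseq (aaseq : String) (sites : List Int) (out : List Int) : Prop := out = parse_sites_within_pepseq_alt aaseq sites
instance (aaseq : String) (sites : List Int) (out : List Int) : Decidable (Spec_parse_sites_within_pepseq aaseq sites out) := by unfold Spec_parse_sites_within_pepseq; infer_instance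

-- ===== CLAIM (what is proved, stated in full; the proofs are below) =====
def Claim_equal_parse_sites_within_pepseq : Prop := ∀ (aaseq : String) (sites : List Int), Dom_parse_sites_within_pepseq aaseq sites → Spec_parse_sites_within_pepseq aaseq sites (parse_sites_within_pepseq aaseq sites)

-- ===== LEMMAS AND PROOFS =====

-- an occurrence of pat fully inside the left part of an append is an occurrence in the left part
theorem pvPrefixDropAppend {u v pat : List Char} {q : ℕ}
    (hq : q + pat.length ≤ u.length) (h : pat <+: (u ++ v).drop q) : pat <+: u.drop q := by
  have hdrop : (u ++ v).drop q = u.drop q ++ v := List.drop_append_of_le_length (by omega)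
  rw [hdrop] at h
  have hlen : pat.length ≤ (u.drop q).length := by simp; omega
  have hteq : pat = (u.drop q).take pat.length := by
    have h2 := List.prefix_iff_eq_take.mp h
    rwa [List.take_append_of_le_length hlen] at h2
  exact List.prefix_iff_eq_take.mpr hteq

-- infix characterised by drops
theorem pvInfixIffDrop (pat l : List Char) : pat <:+: l ↔ ∃ q, pat <+: l.drop q := by
  constructor
  · rintro ⟨s, t, rfl⟩
    exact ⟨s.length, t, by rw [List.append_assoc, List.drop_left]⟩
  · rintro ⟨q, t, ht⟩
    exact ⟨l.take q, t, by rw [List.append_assoc, ht, List.take_append_drop]⟩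

-- key invariant: the stack scan with a pattern-free stack computes A's recursion
theorem pvScanInv : ∀ (cs rstack : List Char) (found sites : List Int),
    ¬ pvPat <:+: rstack.reverse →
    sites ++ pvScanB cs rstack found = parseSitesA (rstack.reverse ++ cs) (sites ++ found) := by
  intro cs
  induction cs with
  | nil =>
    intro rstack found sites hfree
    rw [parseSitesA]
    have : PySem.Chars.find rstack.reverse pvPat = -1 := by
      rw [PySem.Chars.find_eq_neg_one_iff]; simpa using hfree
    simp [pvScanB, this]
  | cons c cs ih =>
    intro rstack found sites hfree
    by_cases hm : (c :: rstack).take 4 = [')', 'c', 'a', '(']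
    · -- match: the stack top spells "(ac)" reversed
      have hlen4 : 4 ≤ (c :: rstack).length := by
        have := congrArg List.length hm; simp at this ⊢; omega
      set rs := c :: rstack with hrs
      set P := (rs.drop 4).reverse with hP
      have hrsrev : rs.reverse = P ++ pvPat := by
        conv_lhs => rw [← List.take_append_drop 4 rs, hm]
        simp [hP, pvPat]
      have hPlen : P.length = rs.length - 4 := by simp [hP]
      have hrev2 : rs.reverse = rstack.reverse ++ [c] := by simp [hrs]
      have hrsl : rs.length = rstack.length + 1 := by simp [hrs]
      have hPpre : P <+: rstack.reverse := by
        have heq : P ++ pvPat = rstack.reverse ++ [c] := by rw [← hrsrev, hrev2]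
        have hPle : P.length ≤ rstack.reverse.length := by simp; omega
        refine List.prefix_iff_eq_take.mpr ?_
        have hx := congrArg (List.take P.length) heq
        rw [List.take_append_of_le_length (le_refl _), List.take_append_of_le_length hPle] at hx
        simpa using hx
      have hPfree : ¬ pvPat <:+: P := fun h => hfree (h.trans hPpre.isInfix)
      -- the whole current string
      have hL : rstack.reverse ++ c :: cs = P ++ pvPat ++ cs := by
        have : rstack.reverse ++ c :: cs = (rstack.reverse ++ [c]) ++ cs := by simp
        rw [this, ← hrev2, hrsrev]
      -- find on it points at P.length
      have hocc : pvPat <+: (P ++ pvPat ++ cs).drop P.length := by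
        simp [List.append_assoc]
      have hinf : pvPat <:+: (P ++ pvPat ++ cs) := (pvInfixIffDrop _ _).mpr ⟨P.length, hocc⟩
      have hne : PySem.Chars.find (P ++ pvPat ++ cs) pvPat ≠ -1 :=
        (PySem.Chars.find_ne_neg_one_iff _ _).mpr hinf
      have h0 : 0 ≤ PySem.Chars.find (P ++ pvPat ++ cs) pvPat :=
        (PySem.Chars.find_nonneg_iff _ _).mpr hinf
      obtain ⟨hsp, hmin⟩ := PySem.Chars.find_spec h0
      have hfindN : (PySem.Chars.find (P ++ pvPat ++ cs) pvPat).toNat = P.length := by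
        by_contra hneq
        rcases Nat.lt_or_ge (PySem.Chars.find (P ++ pvPat ++ cs) pvPat).toNat P.length with hlt | hge
        · -- an earlier occurrence would lie inside rstack.reverse, contradiction
          set q := (PySem.Chars.find (P ++ pvPat ++ cs) pvPat).toNat
          have hq4 : q + pvPat.length ≤ (P ++ pvPat).length := by
            simp [pvPat]; omega
          have h1 : pvPat <+: ((P ++ pvPat) ++ cs).drop q := by
            simpa [List.append_assoc] using hsp
          have h2 : pvPat <+: (P ++ pvPat).drop q := pvPrefixDropAppend hq4 h1
          -- P ++ pvPat = rstack.reverse ++ [c]; q + 4 ≤ rstack.reverse.length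
          have hq4' : q + pvPat.length ≤ rstack.reverse.length := by
            simp [pvPat]
            have : rstack.reverse.length = rs.length - 1 := by simp [hrs]
            omega
          have heq : P ++ pvPat = rstack.reverse ++ [c] := by rw [← hrsrev, hrev2]
          rw [heq] at h2
          have h3 : pvPat <+: rstack.reverse.drop q := pvPrefixDropAppend hq4' h2
          exact hfree ((pvInfixIffDrop _ _).mpr ⟨q, h3⟩)
        · exact absurd (hmin P.length (by omega)) (not_not.mpr hocc)
      have hfind : PySem.Chars.find (P ++ pvPat ++ cs) pvPat = (P.length : Int) := by
        omega
      -- unfold A once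
      rw [hL, parseSitesA]
      simp only [hfind]
      have hne' : ¬ ((P.length : Int) = -1) := by omega
      rw [dif_neg hne']
      have e1 : (P.length : Int) - 1 + 1 = (P.length : Int) := by ring
      have e2 : (P.length : Int) - 1 + 4 + 1 = (P.length : Int) + 4 := by ring
      have e3 : ((P.length : Int) + 4) = ((P.length + 4 : ℕ) : Int) := by push_cast; ring
      have hsliceA : PySem.Chars.slice (P ++ pvPat ++ cs) none (some ((P.length : Int) - 1 + 1)) = P := by
        rw [e1, PySem.Chars.slice_eq_listSlice, PySem.List.slice_to_natCast, List.append_assoc,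
            List.take_left]
      have hsliceB : PySem.Chars.slice (P ++ pvPat ++ cs) (some ((P.length : Int) - 1 + 4 + 1)) none = cs := by
        rw [e2, e3, PySem.Chars.slice_eq_listSlice, PySem.List.slice_from_natCast,
            show P.length + 4 = (P ++ pvPat).length by simp [pvPat]]
        exact List.drop_left
      rw [hsliceA, hsliceB]
      -- and the stack side: recorded value and recursion line up
      have hm' : List.take 4 (c :: rstack) = [')', 'c', 'a', '('] := by rw [← hrs]; exact hm
      rw [show pvScanB (c :: cs) rstack found =
            (if List.take 4 (c :: rstack) = [')', 'c', 'a', '('] then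
              pvScanB cs ((c :: rstack).drop 4)
                (found ++ [((((c :: rstack).drop 4)).length : Int) - 1])
            else pvScanB cs (c :: rstack) found) from rfl,
          if_pos hm']
      have hPfree' : ¬ pvPat <:+: ((c :: rstack).drop 4).reverse := by
        rw [← hrs, ← hP]; exact hPfree
      rw [ih ((c :: rstack).drop 4) (found ++ [((((c :: rstack).drop 4)).length : Int) - 1]) sites hPfree']
      rw [← hrs, ← hP]
      have hpl : (rs.drop 4).length = P.length := by rw [hP, List.length_reverse]
      rw [hpl]
      simp [List.append_assoc]
    · -- no match: c joins the stack, which stays pattern-free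
      have hfree' : ¬ pvPat <:+: (c :: rstack).reverse := by
        intro hinf
        rcases (pvInfixIffDrop _ _).mp hinf with ⟨q, hq⟩
        have hrev : (c :: rstack).reverse = rstack.reverse ++ [c] := by simp
        rw [hrev] at hq
        by_cases hfit : q + pvPat.length ≤ rstack.reverse.length
        · exact hfree ((pvInfixIffDrop _ _).mpr ⟨q, pvPrefixDropAppend hfit hq⟩)
        · -- the occurrence ends at c: then the top of the stack spells the pattern, contra hm
          have hlenq := hq.length_le
          rw [show pvPat.length = 4 from rfl, List.length_drop] at hlenq
          rw [show pvPat.length = 4 from rfl, List.length_reverse] at hfit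
          have hw : (rstack.reverse ++ [c]).length = rstack.length + 1 := by simp
          rw [hw] at hlenq
          have h4 : ((rstack.reverse ++ [c]).drop q).length = 4 := by
            rw [List.length_drop, hw]; omega
          have heq : pvPat = (rstack.reverse ++ [c]).drop q :=
            hq.eq_of_length (by simp [pvPat, h4])
          apply hm
          have hq' : q = (rstack.reverse ++ [c]).length - 4 := by
            have := congrArg List.length heq
            simp [pvPat] at this
            simp
            omega
          have hstep : ((rstack.reverse ++ [c]).drop q).reverse = (c :: rstack).take 4 := by
            rw [List.reverse_drop]
            have h1 : (rstack.reverse ++ [c]).reverse = c :: rstack := by simp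
            rw [h1, hq']
            congr 1
            simp
            omega
          have := congrArg List.reverse heq
          rw [hstep] at this
          rw [← this]
          simp [pvPat]
      have := ih (c :: rstack) found sites hfree'
      rw [show pvScanB (c :: cs) rstack found =
            (if List.take 4 (c :: rstack) = [')', 'c', 'a', '('] then
              pvScanB cs ((c :: rstack).drop 4)
                (found ++ [((((c :: rstack).drop 4)).length : Int) - 1])
            else pvScanB cs (c :: rstack) found) from rfl,
          if_neg hm, this]
      congr 1
      simp

-- ===== VERDICT (by name: the statement is the Claim_ definition above) =====
theorem parse_sites_within_pepseq_spec : Claim_equal_parse_sites_within_pepseq := by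
  intro aaseq sites _
  unfold Spec_parse_sites_within_pepseq parse_sites_within_pepseq parse_sites_within_pepseq_alt
  have h := pvScanInv aaseq.toList [] [] sites (by simp [pvPat])
  simpa using h.symm
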